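-- pv_equiv track=rewrite | github.com/ViktoryaK/Discrete_lab3 | rsa.py | numberblocks_to_message
-- ===== SOURCE A (Python) =====
-- def numberblocks_to_message(num_message, diction, lenn):
--     result = ""
--     half = int(lenn/2)
--     letters = []
--     for block in num_message:
--         if half<2:
--             letters.append(block)
--         else:
--             letters.append(block[:half])
--             letters.append(block[half:])
--     for letter in letters:
--         for key in diction:
--             if diction[key] == letter:
--                 result += key
--     return result
-- ===== SOURCE B (Python) =====
-- def numberblocks_to_message(num_message, diction, lenn):
--     half = int(lenn/2)
--     if half < 2:
--         letters = list(num_message)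
--     else:
--         letters = [part for block in num_message
--                    for part in (block[:half], block[half:])]
--     positions = {}
--     for i, letter in enumerate(letters):
--         positions[letter] = positions.get(letter, []) + [i]
--     slots = [""] * len(letters)
--     for key, value in diction.items():
--         for i in positions.get(value, []):
--             slots[i] += key
--     return "".join(slots)
-- ===== Notes on version B (the rewrite author's own statement) =====
-- stated objective: faster
-- what changed: Inverts the loop nesting: instead of scanning the whole dictionary once per letter, B records each letter's positions once, then makes a single pass over the dictionary scattering every key into per-position output slots, and joins the slots.
import Mathlib
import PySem

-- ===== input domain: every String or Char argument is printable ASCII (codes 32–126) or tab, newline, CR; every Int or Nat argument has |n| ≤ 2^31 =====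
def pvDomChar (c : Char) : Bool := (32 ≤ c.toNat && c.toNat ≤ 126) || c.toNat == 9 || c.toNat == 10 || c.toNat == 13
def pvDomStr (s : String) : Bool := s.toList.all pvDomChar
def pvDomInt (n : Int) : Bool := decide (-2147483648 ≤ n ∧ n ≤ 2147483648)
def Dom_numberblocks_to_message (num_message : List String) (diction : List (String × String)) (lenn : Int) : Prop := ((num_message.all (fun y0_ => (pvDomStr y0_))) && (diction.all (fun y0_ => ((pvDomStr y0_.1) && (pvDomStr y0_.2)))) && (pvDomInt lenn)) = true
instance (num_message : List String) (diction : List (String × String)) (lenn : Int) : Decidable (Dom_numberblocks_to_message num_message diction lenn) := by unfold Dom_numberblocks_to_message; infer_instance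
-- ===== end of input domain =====

-- B inverts A's loop nesting: one pass over the dictionary scatters keys into per-letter-position slots (instead of scanning the dictionary once per letter); return value proved equal.


-- ===== PORT A =====
-- `diction` is a Python dict: iterating `for key in diction` with `diction[key]` visits the
-- items of PySem.Dict.ofList diction (unique keys, insertion order, overwrite in place) — exact.
-- half = int(lenn/2) is trunc-toward-zero division (exact for |lenn| ≤ 2^31): PySem.Int.truncdiv.
def numberblocks_to_message (num_message : List String) (diction : List (String × String)) (lenn : Int) : String :=
  let half := PySem.Int.truncdiv lenn 2
  let letters := num_message.foldl (fun acc block =>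
    if half < 2 then acc ++ [block]
    else (acc ++ [PySem.Str.slice block none (some half)]) ++ [PySem.Str.slice block (some half) none]) []
  letters.foldl (fun result letter =>
    (PySem.Dict.ofList diction).items.foldl
      (fun r kv => if kv.2 == letter then r ++ kv.1 else r) result) ""

-- ===== PORT B =====
-- Source B: letters by comprehension; positions[letter] = positions.get(letter,[]) + [i] over
-- enumerate(letters); then for (key,value) in diction.items(): for i in positions.get(value,[]):
-- slots[i] += key (every such i is in range, so pySetD/pyGetD are exact); ''.join(slots).
def numberblocks_to_message_alt (num_message : List String) (diction : List (String × String)) (lenn : Int) : String :=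
  let half := PySem.Int.truncdiv lenn 2
  let letters := if half < 2 then num_message
    else num_message.flatMap (fun block =>
      [PySem.Str.slice block none (some half), PySem.Str.slice block (some half) none])
  let positions := (PySem.List.enumerate letters 0).foldl
    (fun pos p => pos.modify p.2 [] (· ++ [p.1])) PySem.Dict.empty
  let slots := (PySem.Dict.ofList diction).items.foldl
    (fun slots kv => (positions.getD kv.2 []).foldl
      (fun slots i => PySem.List.pySetD slots i (PySem.List.pyGetD slots i "" ++ kv.1)) slots)
    (List.replicate letters.length "")
  PySem.Str.join "" slots

-- ===== PRECONDITION & SPEC =====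
def Spec_numberblocks_to_message (num_message : List String) (diction : List (String × String)) (lenn : Int) (out : String) : Prop := out = numberblocks_to_message_alt num_message diction lenn
instance (num_message : List String) (diction : List (String × String)) (lenn : Int) (out : String) : Decidable (Spec_numberblocks_to_message num_message diction lenn out) := by unfold Spec_numberblocks_to_message; infer_instance

-- ===== CLAIM (what is proved, stated in full; the proofs are below) =====
def Claim_equal_numberblocks_to_message : Prop := ∀ (num_message : List String) (diction : List (String × String)) (lenn : Int), Dom_numberblocks_to_message num_message diction lenn → Spec_numberblocks_to_message num_message diction lenn (numberblocks_to_message num_message diction lenn)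

-- ===== LEMMAS AND PROOFS =====

-- ''.join of a cons peels off its head.
lemma pv_join_empty_cons (a : String) (l : List String) :
    PySem.Str.join "" (a :: l) = a ++ PySem.Str.join "" l := by
  apply String.toList_inj.mp
  simp only [PySem.Str.toList_join, String.toList_append, List.map_cons]
  show PySem.Chars.join [] (a.toList :: l.map String.toList) = a.toList ++ PySem.Chars.join [] (l.map String.toList)
  cases l with
  | nil => simp [PySem.Chars.join_singleton, PySem.Chars.join_nil]
  | cons b m => rw [List.map_cons, PySem.Chars.join_cons_cons]; simp

-- the keys of `items` whose value is `letter`, joined, in order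
def pvG (items : List (String × String)) (letter : String) : String :=
  PySem.Str.join "" ((items.filter (fun kv => kv.2 == letter)).map (·.1))

lemma pvG_nil (letter : String) : pvG [] letter = "" := by
  simp [pvG, PySem.Str.join]

lemma pvG_cons (kv : String × String) (rest : List (String × String)) (letter : String) :
    pvG (kv :: rest) letter = if kv.2 = letter then kv.1 ++ pvG rest letter else pvG rest letter := by
  unfold pvG
  rw [List.filter_cons]
  by_cases h : kv.2 = letter
  · simp [h, pv_join_empty_cons]
  · simp [h]

-- A's inner scan over the dict items appends exactly those keys, joined.
lemma pv_inner (items : List (String × String)) (res letter : String) :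
    items.foldl (fun r kv => if kv.2 == letter then r ++ kv.1 else r) res
    = res ++ pvG items letter := by
  induction items generalizing res with
  | nil => simp [pvG_nil]
  | cons kv rest ih =>
    rw [List.foldl_cons, pvG_cons]
    by_cases h : kv.2 = letter
    · simp only [h, beq_self_eq_true, if_true, ih, String.append_assoc]
    · simp only [if_neg h, if_neg (by simpa using h : ¬ (kv.2 == letter) = true), ih]

-- A's outer loop is the join of the per-letter strings.
lemma pv_outer (items : List (String × String)) (letters : List String) (res : String) :
    letters.foldl (fun result letter =>
      items.foldl (fun r kv => if kv.2 == letter then r ++ kv.1 else r) result) res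
    = res ++ PySem.Str.join "" (letters.map (pvG items)) := by
  induction letters generalizing res with
  | nil => simp [PySem.Str.join]
  | cons a t ih =>
    rw [List.foldl_cons, pv_inner, ih, List.map_cons, pv_join_empty_cons, String.append_assoc]

-- B's positions dict, looked up at v, lists exactly the positions of v among letters, in order.
lemma pv_positions (letters : List String) (v : String) :
    (((PySem.List.enumerate letters 0).foldl
        (fun pos p => pos.modify p.2 [] (· ++ [p.1])) PySem.Dict.empty).getD v [])
    = (((PySem.List.enumerate letters 0).filter (fun p => p.2 == v)).map (·.1)) := by
  have hsw : (((PySem.List.enumerate letters 0).map Prod.swap).foldl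
      (fun pos p => pos.modify p.1 [] (· ++ [p.2])) PySem.Dict.empty)
    = ((PySem.List.enumerate letters 0).foldl
        (fun pos p => pos.modify p.2 [] (· ++ [p.1])) PySem.Dict.empty) := by
    rw [List.foldl_map]; rfl
  rw [← hsw, PySem.Dict.getD_foldl_modify_append]
  simp [List.filter_map, Function.comp_def, PySem.Dict.getD_empty]

-- positions of v among (a :: t): index 0 if the head matches, plus the shifted positions in t.
lemma pv_idxs_cons (a : String) (t : List String) (v : String) (s : Int) :
    (((PySem.List.enumerate (a :: t) s).filter (fun p => p.2 == v)).map (·.1))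
    = (if a = v then [s] else [])
      ++ (((PySem.List.enumerate t (s+1)).filter (fun p => p.2 == v)).map (·.1)) := by
  rw [PySem.List.enumerate_cons, List.filter_cons]
  by_cases h : a = v
  · simp [h]
  · simp [h]

-- scattering `key` at the positions of v (offset s) into slots that are `pre ++ ls.map h`
-- (pre of length s) rewrites exactly the matching entries of the mapped tail.
lemma pv_scatter (key v : String) (ls : List String) :
    ∀ (h : String → String) (s : Int) (pre : List String), (s = (pre.length : Int)) →
    ((((PySem.List.enumerate ls s).filter (fun p => p.2 == v)).map (·.1)).foldl
      (fun slots i => PySem.List.pySetD slots i (PySem.List.pyGetD slots i "" ++ key))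
      (pre ++ ls.map h))
    = pre ++ ls.map (fun l => if l = v then h l ++ key else h l) := by
  induction ls with
  | nil => intro h s pre _; simp [PySem.List.enumerate_nil]
  | cons a t ih =>
    intro h s pre hs
    subst hs
    rw [pv_idxs_cons, List.map_cons]
    have hsplit : pre ++ h a :: t.map h = (pre ++ [h a]) ++ t.map h := by simp
    by_cases hav : a = v
    · rw [if_pos hav, List.singleton_append, List.foldl_cons]
      have hget : PySem.List.pyGetD (pre ++ h a :: t.map h) (pre.length : Int) "" = h a := by
        rw [PySem.List.pyGetD_natCast]
        simp
      have hset : PySem.List.pySetD (pre ++ h a :: t.map h) (pre.length : Int) (h a ++ key)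
          = (pre ++ [h a ++ key]) ++ t.map h := by
        rw [PySem.List.pySetD_natCast]
        rw [show pre.length = pre.length + 0 from rfl, List.set_append_right _ _ (Nat.le_add_right _ 0)]
        simp
      rw [hget, hset]
      rw [ih h (pre.length + 1) (pre ++ [h a ++ key]) (by simp)]
      simp [hav]
    · rw [if_neg hav, List.nil_append, hsplit]
      rw [ih h (pre.length + 1) (pre ++ [h a]) (by simp)]
      simp [hav]

lemma pv_scatter0 (key v : String) (ls : List String) (h : String → String) :
    ((((PySem.List.enumerate ls 0).filter (fun p => p.2 == v)).map (·.1)).foldl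
      (fun slots i => PySem.List.pySetD slots i (PySem.List.pyGetD slots i "" ++ key))
      (ls.map h))
    = ls.map (fun l => if l = v then h l ++ key else h l) := by
  have hmain := pv_scatter key v ls h 0 [] (by simp)
  simpa using hmain

-- B's slot-filling pass over the dict items, started from letters.map h, appends pvG pointwise.
lemma pv_slots (letters : List String) (items : List (String × String)) :
    ∀ (h : String → String),
    items.foldl
      (fun slots kv => ((((PySem.List.enumerate letters 0).foldl
          (fun pos p => pos.modify p.2 [] (· ++ [p.1])) PySem.Dict.empty).getD kv.2 []).foldl
        (fun slots i => PySem.List.pySetD slots i (PySem.List.pyGetD slots i "" ++ kv.1)) slots))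
      (letters.map h)
    = letters.map (fun l => h l ++ pvG items l) := by
  induction items with
  | nil => intro h; simp [pvG_nil]
  | cons kv rest ih =>
    intro h
    rw [List.foldl_cons, pv_positions,
      pv_scatter0 kv.1 kv.2 letters h, ih]
    apply List.map_congr_left
    intro l _
    rw [pvG_cons]
    by_cases hl : l = kv.2
    · rw [if_pos hl, if_pos hl.symm, String.append_assoc]
    · rw [if_neg hl, if_neg (fun hh => hl hh.symm)]

-- ===== VERDICT (by name: the statement is the Claim_ definition above) =====
theorem numberblocks_to_message_spec : Claim_equal_numberblocks_to_message := by
  intro num_message diction lenn _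
  unfold Spec_numberblocks_to_message numberblocks_to_message numberblocks_to_message_alt
  by_cases hh : PySem.Int.truncdiv lenn 2 < 2
  · simp only [if_pos hh, PySem.List.foldl_append_singleton_eq_self, List.nil_append]
    rw [pv_outer, ← List.map_const', pv_slots]
    simp
  · simp only [if_neg hh, List.append_assoc, List.singleton_append]
    rw [PySem.List.foldl_append_eq_flatMap, List.nil_append]
    rw [pv_outer, ← List.map_const', pv_slots]
    simp
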